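-- pv_equiv track=rewrite | github.com/h1gf68/algorithm | algorithms/contest4_lesson3_graph.py | dfs
-- ===== SOURCE A (Python) =====
-- def dfs(graph, graph_firstly, visited, goal_town, town, dist, prev_town, counter=1):
--     counter += 1
--     visited[town] = True
--     for town_, dist_ in graph_firstly[town]:
--         if town_ != prev_town:
--             graph[goal_town][town_] = dist + dist_
--             dfs(graph, graph_firstly, visited, goal_town, town_, dist+dist_, town, counter)
--
--     return graph
-- ===== SOURCE B (Python) =====
-- # Iterative DFS with an explicit stack instead of recursion; performs the same
-- # in-place mutations of graph and visited as A (pop order = A's preorder, so the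
-- # dict insertion sequence is identical).
-- def dfs(graph, graph_firstly, visited, goal_town, town, dist, prev_town, counter=1):
--     visited[town] = True
--     stack = [(t, town, dist + d) for t, d in reversed(graph_firstly[town]) if t != prev_town]
--     while stack:
--         t, p, d = stack.pop()
--         graph[goal_town][t] = d
--         visited[t] = True
--         for t2, d2 in reversed(graph_firstly[t]):
--             if t2 != p:
--                 stack.append((t2, t, d + d2))
--     return graph
-- ===== Notes on version B (the rewrite author's own statement) =====
-- stated objective: alternative
-- what changed: A's recursive DFS is replaced by an iterative explicit-stack loop that pops (town, prev, dist) entries, writes graph[goal_town][town]=dist and visited[town] at pop time and pushes children in reversed adjacency order, reproducing A's exact dict-write sequence (and in-place mutations) without recursion.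
import Mathlib
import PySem

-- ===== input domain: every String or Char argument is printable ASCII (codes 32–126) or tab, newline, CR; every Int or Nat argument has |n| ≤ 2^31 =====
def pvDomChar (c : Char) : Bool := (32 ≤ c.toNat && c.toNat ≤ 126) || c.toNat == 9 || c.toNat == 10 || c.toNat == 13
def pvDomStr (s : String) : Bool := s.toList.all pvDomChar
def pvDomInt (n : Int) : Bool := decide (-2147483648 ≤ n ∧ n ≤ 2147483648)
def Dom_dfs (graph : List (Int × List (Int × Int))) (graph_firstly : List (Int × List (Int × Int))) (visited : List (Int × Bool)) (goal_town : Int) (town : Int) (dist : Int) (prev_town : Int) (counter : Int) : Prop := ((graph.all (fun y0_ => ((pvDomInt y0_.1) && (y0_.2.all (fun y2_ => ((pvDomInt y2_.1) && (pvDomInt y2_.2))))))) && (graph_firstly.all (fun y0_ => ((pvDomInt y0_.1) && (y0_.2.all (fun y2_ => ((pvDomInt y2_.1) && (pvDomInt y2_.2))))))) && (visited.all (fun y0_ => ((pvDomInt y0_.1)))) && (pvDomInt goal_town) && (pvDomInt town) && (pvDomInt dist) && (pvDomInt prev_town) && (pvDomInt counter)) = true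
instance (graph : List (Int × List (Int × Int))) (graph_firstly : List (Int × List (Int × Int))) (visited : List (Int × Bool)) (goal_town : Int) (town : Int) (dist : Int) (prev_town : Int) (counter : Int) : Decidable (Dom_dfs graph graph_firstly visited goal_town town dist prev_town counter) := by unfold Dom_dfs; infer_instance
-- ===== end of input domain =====

-- B replaces A's recursive DFS by an iterative explicit-stack loop (same writes in the
-- same order, no recursion); both mutate graph/visited in Python identically, and the
-- theorem below is about the returned graph (proved as equality of the whole final state).

-- Shared ports of the single Python statements both programs contain:
-- graph_firstly[t]  (Pre_ guarantees every key Python actually reads is present)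
def pvAdj (gf : List (Int × List (Int × Int))) (t : Int) : List (Int × Int) :=
  ((PySem.Dict.mk gf).get? t).getD []
-- graph[goal][t] = v
def pvSetEdge (g : List (Int × List (Int × Int))) (goal t v : Int) : List (Int × List (Int × Int)) :=
  ((PySem.Dict.mk g).modify goal [] (fun inner => ((PySem.Dict.mk inner).insert t v).items)).items
-- visited[t] = True
def pvSetVis (vis : List (Int × Bool)) (t : Int) : List (Int × Bool) :=
  ((PySem.Dict.mk vis).insert t true).items

-- total number of edge entries of graph_firstly (used only for fuel bounds)
def pvE (gf : List (Int × List (Int × Int))) : Nat :=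
  (gf.map (fun q => q.2.length)).sum

-- ===== PORT A =====
-- A's recursion, with a fuel guard (under Pre_dfs the fuel is proved sufficient);
-- the state threads (graph, visited); counter is threaded exactly as in the Python.
def dfsGo (gf : List (Int × List (Int × Int))) (goal : Int) :
    Nat → Int → Int → Int → Int →
    (List (Int × List (Int × Int)) × List (Int × Bool)) →
    (List (Int × List (Int × Int)) × List (Int × Bool))
  | 0, _, _, _, _, st => st
  | fuel+1, town, dist, prev, counter, st =>
    let counter1 := counter + 1
    (pvAdj gf town).foldl
      (fun s e =>
        if e.1 ≠ prev then
          dfsGo gf goal fuel e.1 (dist + e.2) town counter1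
            (pvSetEdge s.1 goal e.1 (dist + e.2), s.2)
        else s)
      (st.1, pvSetVis st.2 town)

def dfs (graph : List (Int × List (Int × Int))) (graph_firstly : List (Int × List (Int × Int))) (visited : List (Int × Bool)) (goal_town : Int) (town : Int) (dist : Int) (prev_town : Int) (counter : Int) : List (Int × List (Int × Int)) :=
  (dfsGo graph_firstly goal_town (pvE graph_firstly + 3) town dist prev_town counter (graph, visited)).1

-- ===== PORT B =====
-- 'for t2, d2 in reversed(graph_firstly[t]):  if t2 != p: stack.append((t2, t, d + d2))';
-- the stack's head is the Python list's end (its pop() side).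
def pvPush (gf : List (Int × List (Int × Int))) (t p : Int) (d : Int)
    (stk : List (Int × Int × Int)) : List (Int × Int × Int) :=
  (pvAdj gf t).reverse.foldl (fun s e => if e.1 ≠ p then (e.1, t, d + e.2) :: s else s) stk

-- 'while stack: t, p, d = stack.pop(); graph[goal][t] = d; visited[t] = True; push children'
def dfsLoop (gf : List (Int × List (Int × Int))) (goal : Int) :
    Nat → List (Int × Int × Int) →
    (List (Int × List (Int × Int)) × List (Int × Bool)) →
    (List (Int × List (Int × Int)) × List (Int × Bool))
  | 0, _, st => st
  | _+1, [], st => st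
  | fuel+1, (t, p, d) :: rest, st =>
      dfsLoop gf goal fuel (pvPush gf t p d rest) (pvSetEdge st.1 goal t d, pvSetVis st.2 t)

def dfs_alt (graph : List (Int × List (Int × Int))) (graph_firstly : List (Int × List (Int × Int))) (visited : List (Int × Bool)) (goal_town : Int) (town : Int) (dist : Int) (prev_town : Int) (counter : Int) : List (Int × List (Int × Int)) :=
  (dfsLoop graph_firstly goal_town ((pvE graph_firstly + 1) ^ (pvE graph_firstly + 2))
      (pvPush graph_firstly town prev_town dist [])
      (graph, pvSetVis visited town)).1

-- ===== PRECONDITION & SPEC =====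
-- The DFS state graph: a state is (prev, cur); from (p, c) the Python moves to (c, n)
-- for each neighbour n of c with n ≠ p.  pvReach s = the states reachable from s
-- (standard transitive closure over the finite edge-derived state set).
def pvNbrs (gf : List (Int × List (Int × Int))) (s : Int × Int) : Finset (Int × Int) :=
  (((pvAdj gf s.2).filter (fun e => e.1 ≠ s.1)).map (fun e => (s.2, e.1))).toFinset

def pvStep (gf : List (Int × List (Int × Int))) (A : Finset (Int × Int)) : Finset (Int × Int) :=
  A ∪ A.biUnion (pvNbrs gf)

def pvClose (gf : List (Int × List (Int × Int))) : Nat → Finset (Int × Int) → Finset (Int × Int)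
  | 0, A => A
  | n+1, A => if pvStep gf A = A then A else pvClose gf n (pvStep gf A)

def pvReach (gf : List (Int × List (Int × Int))) (s : Int × Int) : Finset (Int × Int) :=
  pvClose gf (pvE gf + 1) {s}

-- Pre_dfs holds exactly when the Python A returns: every town the DFS enters is a key
-- of graph_firstly (else KeyError), the reachable state graph is acyclic (else infinite
-- recursion), and goal_town is a key of graph whenever at least one edge is traversed
-- (else KeyError on the write).
def Pre_dfs (graph : List (Int × List (Int × Int))) (graph_firstly : List (Int × List (Int × Int))) (visited : List (Int × Bool)) (goal_town : Int) (town : Int) (dist : Int) (prev_town : Int) (counter : Int) : Prop :=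
  (∀ s ∈ pvReach graph_firstly (prev_town, town), s.2 ∈ graph_firstly.map Prod.fst) ∧
  (∀ s ∈ pvReach graph_firstly (prev_town, town), ∀ s' ∈ pvNbrs graph_firstly s,
      s ∉ pvReach graph_firstly s') ∧
  ((∃ s ∈ pvReach graph_firstly (prev_town, town), pvNbrs graph_firstly s ≠ ∅) →
      goal_town ∈ graph.map Prod.fst)
instance (graph : List (Int × List (Int × Int))) (graph_firstly : List (Int × List (Int × Int))) (visited : List (Int × Bool)) (goal_town : Int) (town : Int) (dist : Int) (prev_town : Int) (counter : Int) : Decidable (Pre_dfs graph graph_firstly visited goal_town town dist prev_town counter) := by unfold Pre_dfs; infer_instance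

def pvWitness_dfs : (List (Int × List (Int × Int))) × (List (Int × List (Int × Int))) × (List (Int × Bool)) × Int × Int × Int × Int × Int :=
  ([(0, [])], [(1, [(2, 5)]), (2, [(1, 5)])], [], 0, 1, 0, -1, 1)

def Spec_dfs (graph : List (Int × List (Int × Int))) (graph_firstly : List (Int × List (Int × Int))) (visited : List (Int × Bool)) (goal_town : Int) (town : Int) (dist : Int) (prev_town : Int) (counter : Int) (out : List (Int × List (Int × Int))) : Prop := out = dfs_alt graph graph_firstly visited goal_town town dist prev_town counter
instance (graph : List (Int × List (Int × Int))) (graph_firstly : List (Int × List (Int × Int))) (visited : List (Int × Bool)) (goal_town : Int) (town : Int) (dist : Int) (prev_town : Int) (counter : Int) (out : List (Int × List (Int × Int))) : Decidable (Spec_dfs graph graph_firstly visited goal_town town dist prev_town counter out) := by unfold Spec_dfs; infer_instance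

-- ===== CLAIM (what is proved, stated in full; the proofs are below) =====
def Claim_equal_dfs : Prop := ∀ (graph : List (Int × List (Int × Int))) (graph_firstly : List (Int × List (Int × Int))) (visited : List (Int × Bool)) (goal_town : Int) (town : Int) (dist : Int) (prev_town : Int) (counter : Int), Dom_dfs graph graph_firstly visited goal_town town dist prev_town counter → Pre_dfs graph graph_firstly visited goal_town town dist prev_town counter → Spec_dfs graph graph_firstly visited goal_town town dist prev_town counter (dfs graph graph_firstly visited goal_town town dist prev_town counter)

-- ===== LEMMAS AND PROOFS =====

def pvEdgeU (gf : List (Int × List (Int × Int))) : Finset (Int × Int) :=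
  (gf.flatMap (fun q => q.2.map (fun e => (q.1, e.1)))).toFinset

def pvMeas (gf : List (Int × List (Int × Int))) (s : Int × Int) : Nat :=
  (pvReach gf s).card

lemma subset_step (gf : List (Int × List (Int × Int))) (A : Finset (Int × Int)) :
    A ⊆ pvStep gf A := Finset.subset_union_left

lemma subset_close (gf : List (Int × List (Int × Int))) :
    ∀ (n : Nat) (A : Finset (Int × Int)), A ⊆ pvClose gf n A := by
  intro n
  induction n with
  | zero => intro A; simp [pvClose]
  | succ n ih =>
    intro A
    simp only [pvClose]
    split
    · exact Finset.Subset.refl _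
    · exact (subset_step gf A).trans (ih (pvStep gf A))

lemma nbrs_subset_edgeU (gf : List (Int × List (Int × Int))) (s : Int × Int) :
    pvNbrs gf s ⊆ pvEdgeU gf := by
  intro x hx
  simp only [pvNbrs, List.mem_toFinset, List.mem_map, List.mem_filter] at hx
  obtain ⟨e, ⟨hadj, _⟩, rfl⟩ := hx
  unfold pvAdj at hadj
  cases h : (PySem.Dict.mk gf).get? s.2 with
  | none => rw [h] at hadj; cases hadj
  | some a =>
    rw [h] at hadj
    have hmem : (s.2, a) ∈ gf := by
      simpa using PySem.Dict.mem_items_of_get?_eq_some _ h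
    simp only [pvEdgeU, List.mem_toFinset, List.mem_flatMap]
    exact ⟨(s.2, a), hmem, List.mem_map.mpr ⟨e, hadj, rfl⟩⟩

lemma step_subset (gf : List (Int × List (Int × Int))) (A W : Finset (Int × Int))
    (hA : A ⊆ W) (hU : pvEdgeU gf ⊆ W) : pvStep gf A ⊆ W := by
  unfold pvStep
  refine Finset.union_subset hA (Finset.biUnion_subset.mpr ?_)
  intro x _
  exact (nbrs_subset_edgeU gf x).trans hU

lemma close_subset (gf : List (Int × List (Int × Int))) (W : Finset (Int × Int))
    (hU : pvEdgeU gf ⊆ W) :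
    ∀ (n : Nat) (A : Finset (Int × Int)), A ⊆ W → pvClose gf n A ⊆ W := by
  intro n
  induction n with
  | zero => intro A hA; simpa [pvClose] using hA
  | succ n ih =>
    intro A hA
    simp only [pvClose]
    split
    · exact hA
    · exact ih (pvStep gf A) (step_subset gf A W hA hU)

lemma close_closed (gf : List (Int × List (Int × Int))) (W : Finset (Int × Int))
    (hU : pvEdgeU gf ⊆ W) :
    ∀ (n : Nat) (A : Finset (Int × Int)), A ⊆ W → W.card ≤ A.card + n →
      pvStep gf (pvClose gf n A) = pvClose gf n A := by
  intro n
  induction n with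
  | zero =>
    intro A hA hc
    simp only [pvClose]
    have hAW : A = W := Finset.eq_of_subset_of_card_le hA (by omega)
    subst hAW
    exact Finset.Subset.antisymm (step_subset gf A A (Finset.Subset.refl _) hU) (subset_step gf A)
  | succ n ih =>
    intro A hA hc
    simp only [pvClose]
    split
    · assumption
    · rename_i hne
      have hsub : A ⊂ pvStep gf A :=
        Finset.ssubset_iff_subset_ne.mpr ⟨subset_step gf A, fun h => hne h.symm⟩
      have hcard := Finset.card_lt_card hsub
      exact ih (pvStep gf A) (step_subset gf A W hA hU) (by omega)

lemma card_edgeU (gf : List (Int × List (Int × Int))) : (pvEdgeU gf).card ≤ pvE gf := by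
  unfold pvEdgeU pvE
  refine le_trans (List.toFinset_card_le _) ?_
  rw [List.length_flatMap]
  apply le_of_eq
  congr 1
  simp

lemma reach_subset_U (gf : List (Int × List (Int × Int))) (s : Int × Int) :
    pvReach gf s ⊆ insert s (pvEdgeU gf) := by
  apply close_subset gf _ (Finset.subset_insert _ _)
  simp

lemma mem_reach_self (gf : List (Int × List (Int × Int))) (s : Int × Int) :
    s ∈ pvReach gf s := subset_close gf _ _ (Finset.mem_singleton_self s)

lemma reach_closed (gf : List (Int × List (Int × Int))) (s : Int × Int) :
    ∀ x ∈ pvReach gf s, pvNbrs gf x ⊆ pvReach gf s := by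
  have hstep : pvStep gf (pvReach gf s) = pvReach gf s := by
    apply close_closed gf (insert s (pvEdgeU gf)) (Finset.subset_insert _ _)
    · simp
    · have := card_edgeU gf
      have := Finset.card_insert_le s (pvEdgeU gf)
      simp only [Finset.card_singleton]
      omega
  intro x hx y hy
  rw [← hstep]
  unfold pvStep
  exact Finset.mem_union_right _ (Finset.mem_biUnion.mpr ⟨x, hx, hy⟩)

lemma close_min (gf : List (Int × List (Int × Int))) (C : Finset (Int × Int))
    (hC : ∀ x ∈ C, pvNbrs gf x ⊆ C) :
    ∀ (n : Nat) (A : Finset (Int × Int)), A ⊆ C → pvClose gf n A ⊆ C := by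
  intro n
  induction n with
  | zero => intro A hA; simpa [pvClose] using hA
  | succ n ih =>
    intro A hA
    simp only [pvClose]
    split
    · exact hA
    · refine ih (pvStep gf A) ?_
      unfold pvStep
      refine Finset.union_subset hA (Finset.biUnion_subset.mpr ?_)
      intro x hx
      exact hC x (hA hx)

lemma reach_mono (gf : List (Int × List (Int × Int))) {s s' : Int × Int}
    (h : s' ∈ pvReach gf s) : pvReach gf s' ⊆ pvReach gf s := by
  apply close_min gf _ (reach_closed gf s)
  simpa using h

lemma meas_le (gf : List (Int × List (Int × Int))) (s : Int × Int) :
    pvMeas gf s ≤ pvE gf + 1 := by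
  unfold pvMeas
  have h1 := Finset.card_le_card (reach_subset_U gf s)
  have h2 := Finset.card_insert_le s (pvEdgeU gf)
  have h3 := card_edgeU gf
  omega

lemma meas_lt (gf : List (Int × List (Int × Int))) {s s' : Int × Int}
    (h : s' ∈ pvNbrs gf s) (hacy : s ∉ pvReach gf s') : pvMeas gf s' < pvMeas gf s := by
  unfold pvMeas
  have hmem : s' ∈ pvReach gf s := reach_closed gf s s (mem_reach_self gf s) h
  have hsub : pvReach gf s' ⊆ pvReach gf s := reach_mono gf hmem
  refine Finset.card_lt_card ⟨hsub, fun hle => hacy (hle (mem_reach_self gf s))⟩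

lemma mem_nbrs (gf : List (Int × List (Int × Int))) {t p : Int} {e : Int × Int}
    (he : e ∈ pvAdj gf t) (hne : e.1 ≠ p) : (t, e.1) ∈ pvNbrs gf (p, t) := by
  simp only [pvNbrs, List.mem_toFinset, List.mem_map, List.mem_filter]
  exact ⟨e, ⟨he, by simpa using hne⟩, rfl⟩

-- the facts the recursion needs about the child state (t, e.1) of state (p, t)
lemma child_facts (gf : List (Int × List (Int × Int))) {s0 : Int × Int}
    (hA : ∀ x ∈ pvReach gf s0, ∀ y ∈ pvNbrs gf x, x ∉ pvReach gf y)
    {t p : Int} (hmem : (p, t) ∈ pvReach gf s0) {e : Int × Int}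
    (he : e ∈ pvAdj gf t) (hne : e.1 ≠ p) :
    (t, e.1) ∈ pvReach gf s0 ∧ pvMeas gf (t, e.1) < pvMeas gf (p, t) := by
  have hn := mem_nbrs gf he hne
  exact ⟨reach_closed gf s0 (p, t) hmem hn,
    meas_lt gf hn (hA (p, t) hmem (t, e.1) hn)⟩

-- fuel (and counter) irrelevance for A's recursion, as long as fuel > measure
lemma dfsGo_stable (gf : List (Int × List (Int × Int))) (goal : Int) (s0 : Int × Int)
    (hA : ∀ x ∈ pvReach gf s0, ∀ y ∈ pvNbrs gf x, x ∉ pvReach gf y) :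
    ∀ (n a b : Nat) (t d p c1 c2 : Int) st, (p, t) ∈ pvReach gf s0 →
      pvMeas gf (p, t) < n → pvMeas gf (p, t) < a → pvMeas gf (p, t) < b →
      dfsGo gf goal a t d p c1 st = dfsGo gf goal b t d p c2 st := by
  intro n
  induction n with
  | zero => intros; omega
  | succ n ih =>
    intro a b t d p c1 c2 st hmem hn ha hb
    cases a with
    | zero => omega
    | succ a' =>
      cases b with
      | zero => omega
      | succ b' =>
        simp only [dfsGo]
        apply PySem.List.foldl_congr_mem
        intro s e he
        by_cases hp : e.1 ≠ p
        · obtain ⟨hmemC, hmeasC⟩ := child_facts gf hA hmem he hp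
          simp only [if_pos hp]
          exact ih a' b' e.1 (d + e.2) t (c1+1) (c2+1) _ hmemC (by omega) (by omega) (by omega)
        · simp only [if_neg hp]

-- the per-node fold of A, with explicit fuel for the recursive calls
def foldGo (gf : List (Int × List (Int × Int))) (goal : Int) (a : Nat)
    (t p : Int) (d c : Int) (cs : List (Int × Int))
    (st : List (Int × List (Int × Int)) × List (Int × Bool)) :
    List (Int × List (Int × Int)) × List (Int × Bool) :=
  cs.foldl
    (fun s e =>
      if e.1 ≠ p then
        dfsGo gf goal a e.1 (d + e.2) t c (pvSetEdge s.1 goal e.1 (d + e.2), s.2)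
      else s) st

lemma foldGo_stable (gf : List (Int × List (Int × Int))) (goal : Int) (s0 : Int × Int)
    (hA : ∀ x ∈ pvReach gf s0, ∀ y ∈ pvNbrs gf x, x ∉ pvReach gf y)
    (a b : Nat) (t p : Int) (d c1 c2 : Int) (cs : List (Int × Int)) st
    (h : ∀ e ∈ cs, e.1 ≠ p →
        (t, e.1) ∈ pvReach gf s0 ∧ pvMeas gf (t, e.1) < a ∧ pvMeas gf (t, e.1) < b) :
    foldGo gf goal a t p d c1 cs st = foldGo gf goal b t p d c2 cs st := by
  unfold foldGo
  apply PySem.List.foldl_congr_mem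
  intro s e he
  by_cases hp : e.1 ≠ p
  · obtain ⟨hm, ha, hb⟩ := h e he hp
    simp only [if_pos hp]
    exact dfsGo_stable gf goal s0 hA (pvMeas gf (t, e.1) + 1) a b e.1 (d + e.2) t c1 c2 _
      hm (by omega) ha hb
  · simp only [if_neg hp]

lemma dfsGo_unfold (gf : List (Int × List (Int × Int))) (goal : Int) (a : Nat)
    (t d p c : Int) st :
    dfsGo gf goal (a + 1) t d p c st
      = foldGo gf goal a t p d (c + 1) (pvAdj gf t) (st.1, pvSetVis st.2 t) := by
  simp only [dfsGo, foldGo]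

lemma loop_nil (gf : List (Int × List (Int × Int))) (goal : Int) (f : Nat) st :
    dfsLoop gf goal f [] st = st := by
  cases f <;> rfl

-- the stack entries produced by pushing cs (as seen from the pop side)
def stackItems (t p : Int) (d : Int) (cs : List (Int × Int)) : List (Int × Int × Int) :=
  cs.filterMap (fun e => if e.1 ≠ p then some (e.1, t, d + e.2) else none)

lemma pushRev_eq (t p : Int) (d : Int) (cs : List (Int × Int)) (stk : List (Int × Int × Int)) :
    cs.reverse.foldl (fun s e => if e.1 ≠ p then (e.1, t, d + e.2) :: s else s) stk
      = stackItems t p d cs ++ stk := by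
  induction cs generalizing stk with
  | nil => simp [stackItems]
  | cons e cs ih =>
    simp only [List.reverse_cons, List.foldl_append, List.foldl_cons, List.foldl_nil]
    rw [ih]
    by_cases hp : e.1 ≠ p
    · simp [stackItems, hp]
    · simp [stackItems, hp]

lemma push_eq (gf : List (Int × List (Int × Int))) (t p : Int) (d : Int) stk :
    pvPush gf t p d stk = stackItems t p d (pvAdj gf t) ++ stk := by
  unfold pvPush; exact pushRev_eq t p d (pvAdj gf t) stk

-- number of edge entries of the first matching adjacency list is ≤ the total
lemma adj_len_le (gf : List (Int × List (Int × Int))) (t : Int) :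
    (pvAdj gf t).length ≤ pvE gf := by
  unfold pvAdj
  cases h : (PySem.Dict.mk gf).get? t with
  | none => simp [pvE]
  | some a =>
    have hmem : (t, a) ∈ gf := by
      simpa using PySem.Dict.mem_items_of_get?_eq_some _ h
    simp only [Option.getD_some]
    have : a.length ∈ gf.map (fun q => q.2.length) := List.mem_map.mpr ⟨(t, a), hmem, rfl⟩
    exact (List.le_sum_of_mem this)

-- MAIN LEMMA: processing the pushed children of t consumes some fuel m (bounded by
-- cs.length·(E+1)^meas (p,t)) and leaves exactly the state A's fold computes.
lemma innerL (gf : List (Int × List (Int × Int))) (goal : Int) (s0 : Int × Int)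
    (hA : ∀ x ∈ pvReach gf s0, ∀ y ∈ pvNbrs gf x, x ∉ pvReach gf y) :
    ∀ (n : Nat) (t p : Int) (d c : Int) (cs : List (Int × Int)),
      (p, t) ∈ pvReach gf s0 → pvMeas gf (p, t) < n →
      (∀ e ∈ cs, e.1 ≠ p →
          (t, e.1) ∈ pvReach gf s0 ∧ pvMeas gf (t, e.1) < pvMeas gf (p, t)) →
      ∀ (rest : List (Int × Int × Int)) st,
        ∃ m, m ≤ cs.length * (pvE gf + 1) ^ (pvMeas gf (p, t)) ∧
          ∀ f, dfsLoop gf goal (m + f) (stackItems t p d cs ++ rest) st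
                 = dfsLoop gf goal f rest (foldGo gf goal (pvE gf + 2) t p d c cs st) := by
  intro n
  induction n with
  | zero => intro t p d c cs hmem h; omega
  | succ n ihn =>
    intro t p d c cs hmem hn hcs
    induction cs with
    | nil =>
      intro rest st
      exact ⟨0, by simp, fun f => by simp [stackItems, foldGo]⟩
    | cons e cs ihcs =>
      intro rest st
      by_cases hp : e.1 ≠ p
      · -- child really pushed
        obtain ⟨hmemC, hmeasC⟩ := hcs e (by simp) hp
        have hItems : stackItems t p d (e :: cs) = (e.1, t, d + e.2) :: stackItems t p d cs := by
          simp [stackItems, hp]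
        -- child's own subtree, via the outer induction hypothesis
        obtain ⟨m1, hm1b, hm1⟩ :=
          ihn e.1 t (d + e.2) (c + 1) (pvAdj gf e.1) hmemC (by omega)
            (fun e' he' hne' => child_facts gf hA hmemC he' hne')
            (stackItems t p d cs ++ rest)
            (pvSetEdge st.1 goal e.1 (d + e.2), pvSetVis st.2 e.1)
        -- remaining siblings, via the list induction hypothesis
        have hcs' : ∀ e' ∈ cs, e'.1 ≠ p →
            (t, e'.1) ∈ pvReach gf s0 ∧ pvMeas gf (t, e'.1) < pvMeas gf (p, t) := by
          intro e' he'; exact hcs e' (by simp [he'])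
        obtain ⟨m2, hm2b, hm2⟩ := ihcs hcs' rest
          (dfsGo gf goal (pvE gf + 2) e.1 (d + e.2) t c
            (pvSetEdge st.1 goal e.1 (d + e.2), st.2))
        refine ⟨1 + m1 + m2, ?_, ?_⟩
        · -- arithmetic bound
          have hE : (pvAdj gf e.1).length ≤ pvE gf := adj_len_le gf e.1
          have h1 : (1:Nat) ≤ (pvE gf + 1) ^ (pvMeas gf (t, e.1)) := Nat.one_le_pow _ _ (by omega)
          have hmul : m1 ≤ pvE gf * (pvE gf + 1) ^ (pvMeas gf (t, e.1)) :=
            le_trans hm1b (Nat.mul_le_mul_right _ hE)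
          have hstep : pvE gf * (pvE gf + 1) ^ (pvMeas gf (t, e.1)) + 1
              ≤ (pvE gf + 1) ^ (pvMeas gf (t, e.1) + 1) := by
            rw [pow_succ]
            nlinarith [h1]
          have hpow : (pvE gf + 1) ^ (pvMeas gf (t, e.1) + 1) ≤ (pvE gf + 1) ^ (pvMeas gf (p, t)) :=
            Nat.pow_le_pow_right (by omega) (by omega)
          have : 1 + m1 ≤ (pvE gf + 1) ^ (pvMeas gf (p, t)) := by omega
          have hfin : 1 + m1 + m2
              ≤ (pvE gf + 1) ^ (pvMeas gf (p, t)) + cs.length * (pvE gf + 1) ^ (pvMeas gf (p, t)) := by omega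
          calc 1 + m1 + m2
              ≤ (pvE gf + 1) ^ (pvMeas gf (p, t)) + cs.length * (pvE gf + 1) ^ (pvMeas gf (p, t)) := hfin
            _ = (e :: cs).length * (pvE gf + 1) ^ (pvMeas gf (p, t)) := by
                simp [List.length_cons, Nat.succ_mul, Nat.add_comm]
        · intro f
          rw [hItems]
          have hshape : 1 + m1 + m2 + f = (m1 + (m2 + f)) + 1 := by omega
          rw [hshape]
          show dfsLoop gf goal (m1 + (m2 + f) + 1) ((e.1, t, d + e.2) :: (stackItems t p d cs ++ rest)) st = _
          rw [show ∀ (fu : Nat) (r : List (Int × Int × Int)) (s : _),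
                dfsLoop gf goal (fu + 1) ((e.1, t, d + e.2) :: r) s
                  = dfsLoop gf goal fu (pvPush gf e.1 t (d + e.2) r)
                      (pvSetEdge s.1 goal e.1 (d + e.2), pvSetVis s.2 e.1)
              from fun fu r s => rfl]
          rw [push_eq]
          rw [hm1 (m2 + f)]
          -- the child's resulting state is A's recursive call
          have hchild :
              foldGo gf goal (pvE gf + 2) e.1 t (d + e.2) (c + 1) (pvAdj gf e.1)
                  ((pvSetEdge st.1 goal e.1 (d + e.2), pvSetVis st.2 e.1))
                = dfsGo gf goal (pvE gf + 2) e.1 (d + e.2) t c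
                    (pvSetEdge st.1 goal e.1 (d + e.2), st.2) := by
            rw [show pvE gf + 2 = (pvE gf + 1) + 1 by omega]
            rw [dfsGo_unfold]
            exact foldGo_stable gf goal s0 hA ((pvE gf + 1) + 1) (pvE gf + 1) e.1 t (d + e.2)
              (c + 1) (c + 1) (pvAdj gf e.1) _
              (by
                intro e' he' hne'
                obtain ⟨hm', hlt'⟩ := child_facts gf hA hmemC he' hne'
                have := meas_le gf (t, e.1)
                exact ⟨hm', by omega, by omega⟩)
          rw [hchild]
          rw [hm2 f]
          congr 1
          simp only [foldGo, List.foldl_cons, if_pos hp]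
      · -- child filtered out (equals p)
        have hItems : stackItems t p d (e :: cs) = stackItems t p d cs := by
          simp [stackItems, hp]
        have hcs' : ∀ e' ∈ cs, e'.1 ≠ p →
            (t, e'.1) ∈ pvReach gf s0 ∧ pvMeas gf (t, e'.1) < pvMeas gf (p, t) := by
          intro e' he'; exact hcs e' (by simp [he'])
        obtain ⟨m2, hm2b, hm2⟩ := ihcs hcs' rest st
        refine ⟨m2, le_trans hm2b (Nat.mul_le_mul_right _ (by simp)), ?_⟩
        intro f
        rw [hItems, hm2 f]
        congr 1
        simp only [foldGo, List.foldl_cons, if_neg hp]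

-- ===== VERDICT (by name: the statement is the Claim_ definition above) =====
theorem dfs_spec : Claim_equal_dfs := by
  intro graph gf visited goal town dist prev counter _hDom hPre
  obtain ⟨-, hA, -⟩ := hPre
  unfold Spec_dfs dfs dfs_alt
  rw [show pvE gf + 3 = (pvE gf + 2) + 1 by omega, dfsGo_unfold, push_eq]
  obtain ⟨m, hmb, hrun⟩ :=
    innerL gf goal (prev, town) hA (pvMeas gf (prev, town) + 1) town prev dist (counter + 1)
      (pvAdj gf town) (mem_reach_self gf (prev, town)) (by omega)
      (fun e he hne => child_facts gf hA (mem_reach_self gf (prev, town)) he hne)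
      [] (graph, pvSetVis visited town)
  have hE : (pvAdj gf town).length ≤ pvE gf := adj_len_le gf town
  have hfuel : m ≤ (pvE gf + 1) ^ (pvE gf + 2) := by
    have h1 : (1:Nat) ≤ (pvE gf + 1) ^ (pvMeas gf (prev, town)) := Nat.one_le_pow _ _ (by omega)
    have hpow : (pvE gf + 1) ^ (pvMeas gf (prev, town)) ≤ (pvE gf + 1) ^ (pvE gf + 1) :=
      Nat.pow_le_pow_right (by omega) (meas_le gf (prev, town))
    have hm : m ≤ pvE gf * (pvE gf + 1) ^ (pvE gf + 1) := by
      calc m ≤ (pvAdj gf town).length * (pvE gf + 1) ^ (pvMeas gf (prev, town)) := hmb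
        _ ≤ pvE gf * (pvE gf + 1) ^ (pvE gf + 1) := Nat.mul_le_mul hE hpow
    have hsucc : (pvE gf + 1) ^ (pvE gf + 2)
        = (pvE gf + 1) ^ (pvE gf + 1) * (pvE gf + 1) := pow_succ _ _
    nlinarith [Nat.one_le_pow (pvE gf + 1) (pvE gf + 1) (show 0 < pvE gf + 1 by omega)]
  have hsplit : (pvE gf + 1) ^ (pvE gf + 2) = m + ((pvE gf + 1) ^ (pvE gf + 2) - m) := by
    omega
  show (foldGo gf goal (pvE gf + 2) town prev dist (counter + 1) (pvAdj gf town)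
      (graph, pvSetVis visited town)).1
    = (dfsLoop gf goal ((pvE gf + 1) ^ (pvE gf + 2))
        (stackItems town prev dist (pvAdj gf town) ++ []) (graph, pvSetVis visited town)).1
  rw [hsplit, hrun, loop_nil]
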